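-- pv_equiv track=rewrite | github.com/medihebtbessi/data-generator | layout_engine.py | _find_best_destination
-- ===== SOURCE A (Python) =====
-- LARGE_ELEMENTS = frozenset({"qr", "logo"})
--
-- INCOMPATIBLE_PAIRS: frozenset[frozenset] = frozenset({
--     frozenset({"qr", "logo"}),
-- })
--
-- def _find_best_destination(
--     slots:   dict[str, list[str]],
--     element: str,
--     exclude: list[str],
-- ) -> str:
--     """
--     Find the best slot to receive ``element`` without creating new violations.
--
--     Selection criteria (tried in order):
--       1. No incompatible pair would be created
--       2. No second LARGE element would be placed in the slot
--       3. Fewest current elements (lowest load wins)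
--
--     Falls back progressively to weaker constraints if no ideal slot exists.
--     """
--     is_large = element in LARGE_ELEMENTS
--
--     # ── Ideal candidates: full constraint satisfaction ─────────────────────
--     ideal: list[tuple[int, str]] = []
--     for sname, elems in slots.items():
--         if sname in exclude:
--             continue
--         # Check no incompatible pair
--         for pair in INCOMPATIBLE_PAIRS:
--             if element in pair and any(e in pair and e != element for e in elems):
--                 break
--         else:
--             # Check LARGE capacity
--             if is_large and any(e in LARGE_ELEMENTS for e in elems):
--                 continue
--             ideal.append((len(elems), sname))
--
--     if ideal:
--         ideal.sort()
--         return ideal[0][1]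
--
--     # ── Relaxed fallback 1: skip LARGE capacity check ─────────────────────
--     relaxed: list[tuple[int, str]] = []
--     for sname, elems in slots.items():
--         if sname in exclude:
--             continue
--         conflict = False
--         for pair in INCOMPATIBLE_PAIRS:
--             if element in pair and any(e in pair and e != element for e in elems):
--                 conflict = True
--                 break
--         if not conflict:
--             relaxed.append((len(elems), sname))
--
--     if relaxed:
--         relaxed.sort()
--         return relaxed[0][1]
--
--     # ── Ultimate fallback: first non-excluded slot ─────────────────────────
--     for sname in slots:
--         if sname not in exclude:
--             return sname
--
--     return list(slots.keys())[0]   # should never be reached with 3 slots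
-- ===== SOURCE B (Python) =====
-- LARGE_ELEMENTS = frozenset({"qr", "logo"})
--
-- INCOMPATIBLE_PAIRS = frozenset({
--     frozenset({"qr", "logo"}),
-- })
--
--
-- def _conflicts(element, elems):
--     return any(
--         element in pair and any(e in pair and e != element for e in elems)
--         for pair in INCOMPATIBLE_PAIRS
--     )
--
--
-- def _better(cand, best):
--     return best is None or cand < best
--
--
-- def _find_best_destination(slots, element, exclude):
--     """Single classification pass: running minima for the ideal and relaxed
--     buckets plus the first non-excluded slot, instead of three scans + sort."""
--     is_large = element in LARGE_ELEMENTS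
--     first = None
--     ideal = None    # running min of (load, name) over fully-constrained slots
--     relaxed = None  # running min of (load, name) over conflict-free slots
--     for sname, elems in slots.items():
--         if sname in exclude:
--             continue
--         if first is None:
--             first = sname
--         if _conflicts(element, elems):
--             continue
--         cand = (len(elems), sname)
--         if _better(cand, relaxed):
--             relaxed = cand
--         if not (is_large and any(e in LARGE_ELEMENTS for e in elems)):
--             if _better(cand, ideal):
--                 ideal = cand
--     if ideal is not None:
--         return ideal[1]
--     if relaxed is not None:
--         return relaxed[1]
--     if first is not None:
--         return first
--     return list(slots)[0]
-- ===== Notes on version B (the rewrite author's own statement) =====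
-- stated objective: alternative
-- what changed: Replaces A's three separate scans over the slots (ideal pass + sort, relaxed pass + sort, fallback search) by a single classification pass that keeps running minima of (load, name) for the ideal and relaxed buckets plus the first non-excluded slot, then picks among them.
import Mathlib
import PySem

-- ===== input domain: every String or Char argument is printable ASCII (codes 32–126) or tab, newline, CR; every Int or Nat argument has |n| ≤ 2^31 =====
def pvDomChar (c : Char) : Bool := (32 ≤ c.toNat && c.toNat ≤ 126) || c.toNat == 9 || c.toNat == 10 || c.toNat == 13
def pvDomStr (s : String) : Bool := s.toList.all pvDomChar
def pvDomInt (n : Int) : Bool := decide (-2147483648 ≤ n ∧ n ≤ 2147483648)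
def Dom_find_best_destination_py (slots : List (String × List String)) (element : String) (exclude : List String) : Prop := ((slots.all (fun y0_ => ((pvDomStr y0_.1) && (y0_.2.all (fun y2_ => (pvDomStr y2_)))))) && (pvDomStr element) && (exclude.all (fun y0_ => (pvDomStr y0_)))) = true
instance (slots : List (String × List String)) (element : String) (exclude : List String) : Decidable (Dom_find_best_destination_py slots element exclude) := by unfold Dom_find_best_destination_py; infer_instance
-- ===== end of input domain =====

-- B replaces A's three scans over the slots (plus two list sorts) by a single classification
-- pass keeping running minima and the first non-excluded slot (objective: alternative/simpler).

-- ===== PORT A =====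
def pvLargeElements : List String := ["qr", "logo"]
def pvIncompatiblePairs : List (List String) := [["qr", "logo"]]

-- the 'for pair in INCOMPATIBLE_PAIRS: … break / else' test, shared by both ports
def pvConflict (element : String) (elems : List String) : Bool :=
  pvIncompatiblePairs.any (fun pair =>
    pair.contains element && elems.any (fun e => pair.contains e && e != element))

def find_best_destination_py (slots : List (String × List String)) (element : String) (exclude : List String) : String :=
  let is_large := pvLargeElements.contains element
  -- ideal candidates: full constraint satisfaction
  let ideal : List (Nat × String) :=
    slots.foldl (fun acc sp =>
      if exclude.contains sp.1 then acc
      else if pvConflict element sp.2 then acc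
      else if is_large && sp.2.any (fun e => pvLargeElements.contains e) then acc
      else acc ++ [(sp.2.length, sp.1)]) []
  match PySem.List.sorted2 ideal (fun c => c.1) (fun c => c.2) with
  | c :: _ => c.2
  | [] =>
    -- relaxed fallback: skip the LARGE capacity check
    let relaxed : List (Nat × String) :=
      slots.foldl (fun acc sp =>
        if exclude.contains sp.1 then acc
        else if pvConflict element sp.2 then acc
        else acc ++ [(sp.2.length, sp.1)]) []
    match PySem.List.sorted2 relaxed (fun c => c.1) (fun c => c.2) with
    | c :: _ => c.2
    | [] =>
      -- ultimate fallback: first non-excluded slot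
      match slots.find? (fun sp => !(exclude.contains sp.1)) with
      | some sp => sp.1
      | none =>
        match slots with    -- list(slots.keys())[0]; IndexError on [] is excluded by Pre_
        | sp :: _ => sp.1
        | [] => ""

-- ===== PORT B =====
-- cand < best on Python tuples (int, str): lexicographic
def pvLt (a b : Nat × String) : Bool := decide (a.1 < b.1) || (a.1 == b.1 && decide (a.2 < b.2))

def pvBetter (cand : Nat × String) (best : Option (Nat × String)) : Bool :=
  match best with
  | none => true
  | some m => pvLt cand m

def find_best_destination_py_alt (slots : List (String × List String)) (element : String) (exclude : List String) : String :=
  let is_large := pvLargeElements.contains element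
  let st : Option String × Option (Nat × String) × Option (Nat × String) :=
    slots.foldl (fun st sp =>
      if exclude.contains sp.1 then st
      else
        let first := match st.1 with | none => some sp.1 | some f => some f
        if pvConflict element sp.2 then (first, st.2.1, st.2.2)
        else
          let cand := (sp.2.length, sp.1)
          let relaxed := if pvBetter cand st.2.2 then some cand else st.2.2
          let ideal :=
            if !(is_large && sp.2.any (fun e => pvLargeElements.contains e)) then
              (if pvBetter cand st.2.1 then some cand else st.2.1)
            else st.2.1
          (first, ideal, relaxed)) (none, none, none)
  match st.2.1 with
  | some m => m.2
  | none =>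
    match st.2.2 with
    | some m => m.2
    | none =>
      match st.1 with
      | some f => f
      | none =>
        match slots with
        | sp :: _ => sp.1
        | [] => ""

-- ===== PRECONDITION & SPEC =====
-- Pre_ excludes only the empty dict, on which the Python A raises IndexError at list(slots.keys())[0].
def Pre_find_best_destination_py (slots : List (String × List String)) (element : String) (exclude : List String) : Prop := slots ≠ []
instance (slots : List (String × List String)) (element : String) (exclude : List String) : Decidable (Pre_find_best_destination_py slots element exclude) := by unfold Pre_find_best_destination_py; infer_instance

def pvWitness_find_best_destination_py : (List (String × List String)) × String × List String :=
  ([("header", ["logo"]), ("body", [])], "qr", ["body"])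

def Spec_find_best_destination_py (slots : List (String × List String)) (element : String) (exclude : List String) (out : String) : Prop := out = find_best_destination_py_alt slots element exclude
instance (slots : List (String × List String)) (element : String) (exclude : List String) (out : String) : Decidable (Spec_find_best_destination_py slots element exclude out) := by unfold Spec_find_best_destination_py; infer_instance

-- ===== CLAIM (what is proved, stated in full; the proofs are below) =====
def Claim_equal_find_best_destination_py : Prop := ∀ (slots : List (String × List String)) (element : String) (exclude : List String), Dom_find_best_destination_py slots element exclude → Pre_find_best_destination_py slots element exclude → Spec_find_best_destination_py slots element exclude (find_best_destination_py slots element exclude)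

-- ===== LEMMAS AND PROOFS =====

-- predicates and candidate projection used to describe both folds
def pvKeepR (element : String) (exclude : List String) (sp : String × List String) : Bool :=
  !(exclude.contains sp.1) && !(pvConflict element sp.2)

def pvKeepI (element : String) (exclude : List String) (sp : String × List String) : Bool :=
  pvKeepR element exclude sp &&
    !(pvLargeElements.contains element && sp.2.any (fun e => pvLargeElements.contains e))

def pvCand (sp : String × List String) : Nat × String := (sp.2.length, sp.1)

def pvMin (acc : Option (Nat × String)) (x : Nat × String) : Option (Nat × String) :=
  match acc with
  | none => some x
  | some m => if pvLt x m then some x else some m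

def pvMinL (l : List (Nat × String)) : Option (Nat × String) := l.foldl pvMin none

theorem pvBetter_eq_min (c : Nat × String) (o : Option (Nat × String)) :
    (if pvBetter c o then some c else o) = pvMin o c := by
  cases o <;> simp [pvBetter, pvMin]

theorem pvLt_eq_before (a b : Nat × String) :
    pvLt a b = (decide (a.1 < b.1) || (!decide (b.1 < a.1) && decide (a.2 < b.2))) := by
  unfold pvLt
  rcases Nat.lt_trichotomy a.1 b.1 with h | h | h
  · simp [h]
  · simp [h]
  · simp [Nat.lt_asymm h, Nat.ne_of_gt h, h]

theorem head?_insertBy (r : (Nat × String) → (Nat × String) → Bool) (x : Nat × String)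
    (ys : List (Nat × String)) :
    (PySem.List.insertBy r x ys).head? =
      some (match ys with | [] => x | y :: _ => if r x y then x else y) := by
  cases ys with
  | nil => simp [PySem.List.insertBy]
  | cons y t =>
    by_cases h : r x y <;> simp [PySem.List.insertBy, h]

theorem sorted2_head (l : List (Nat × String)) :
    (PySem.List.sorted2 l (fun c => c.1) (fun c => c.2)).head? = pvMinL l := by
  induction l using List.reverseRecOn with
  | nil => rfl
  | append_singleton l x ih =>
    unfold PySem.List.sorted2 at *
    simp only [Bool.false_eq_true, if_false, List.foldl_append, List.foldl_cons,
      List.foldl_nil] at *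
    rw [head?_insertBy]
    unfold pvMinL at *
    simp only [List.foldl_append, List.foldl_cons, List.foldl_nil]
    cases hs : List.foldl (fun acc x =>
        PySem.List.insertBy (fun a b =>
          decide (a.1 < b.1) || (!decide (b.1 < a.1) && decide (a.2 < b.2))) x acc) [] l with
    | nil =>
      rw [hs] at ih
      simp at ih
      simp [← ih, pvMin]
    | cons y t =>
      rw [hs] at ih
      simp at ih
      simp [← ih, pvMin, pvLt_eq_before]
      split <;> rfl

theorem pvMin_some_isSome (t : List (Nat × String)) (m : Nat × String) :
    (t.foldl pvMin (some m)).isSome = true := by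
  induction t generalizing m with
  | nil => rfl
  | cons x t ih =>
    simp only [List.foldl_cons, pvMin]
    by_cases h : pvLt x m <;> simp [h, ih]

theorem pvMinL_eq_none_iff (l : List (Nat × String)) : pvMinL l = none ↔ l = [] := by
  cases l with
  | nil => simp [pvMinL]
  | cons x t =>
    simp only [pvMinL, List.foldl_cons, pvMin]
    constructor
    · intro h
      have := pvMin_some_isSome t x
      rw [h] at this
      simp at this
    · intro h; cases h

theorem idealA_eq (slots : List (String × List String)) (element : String) (exclude : List String) :
    slots.foldl (fun acc sp =>
      if exclude.contains sp.1 then acc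
      else if pvConflict element sp.2 then acc
      else if pvLargeElements.contains element && sp.2.any (fun e => pvLargeElements.contains e) then acc
      else acc ++ [(sp.2.length, sp.1)]) [] =
    (slots.filter (pvKeepI element exclude)).map pvCand := by
  have h : ∀ (acc : List (Nat × String)) (sp : String × List String),
      (if exclude.contains sp.1 then acc
       else if pvConflict element sp.2 then acc
       else if pvLargeElements.contains element && sp.2.any (fun e => pvLargeElements.contains e) then acc
       else acc ++ [(sp.2.length, sp.1)]) =
      (if pvKeepI element exclude sp then acc ++ [pvCand sp] else acc) := by
    intro acc sp
    cases h1 : exclude.contains sp.1 <;>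
      cases h2 : pvConflict element sp.2 <;>
        cases h3 : pvLargeElements.contains element && sp.2.any (fun e => pvLargeElements.contains e) <;>
          simp_all [pvKeepI, pvKeepR, pvCand]
  calc slots.foldl (fun acc sp =>
      if exclude.contains sp.1 then acc
      else if pvConflict element sp.2 then acc
      else if pvLargeElements.contains element && sp.2.any (fun e => pvLargeElements.contains e) then acc
      else acc ++ [(sp.2.length, sp.1)]) []
      = slots.foldl (fun acc sp => if pvKeepI element exclude sp then acc ++ [pvCand sp] else acc) [] := by
        apply PySem.List.foldl_congr_mem
        intro acc sp _
        exact h acc sp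
    _ = (slots.filter (pvKeepI element exclude)).map pvCand := by
        simpa using PySem.List.foldl_append_if (pvKeepI element exclude) pvCand slots []

theorem relaxedA_eq (slots : List (String × List String)) (element : String) (exclude : List String) :
    slots.foldl (fun acc sp =>
      if exclude.contains sp.1 then acc
      else if pvConflict element sp.2 then acc
      else acc ++ [(sp.2.length, sp.1)]) [] =
    (slots.filter (pvKeepR element exclude)).map pvCand := by
  have h : ∀ (acc : List (Nat × String)) (sp : String × List String),
      (if exclude.contains sp.1 then acc
       else if pvConflict element sp.2 then acc
       else acc ++ [(sp.2.length, sp.1)]) =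
      (if pvKeepR element exclude sp then acc ++ [pvCand sp] else acc) := by
    intro acc sp
    cases h1 : exclude.contains sp.1 <;>
      cases h2 : pvConflict element sp.2 <;>
        simp_all [pvKeepR, pvCand]
  calc slots.foldl (fun acc sp =>
      if exclude.contains sp.1 then acc
      else if pvConflict element sp.2 then acc
      else acc ++ [(sp.2.length, sp.1)]) []
      = slots.foldl (fun acc sp => if pvKeepR element exclude sp then acc ++ [pvCand sp] else acc) [] := by
        apply PySem.List.foldl_congr_mem
        intro acc sp _
        exact h acc sp
    _ = (slots.filter (pvKeepR element exclude)).map pvCand := by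
        simpa using PySem.List.foldl_append_if (pvKeepR element exclude) pvCand slots []

-- B's single pass computes exactly: first non-excluded slot, min of ideal candidates, min of relaxed candidates
theorem B_fold_eq (slots : List (String × List String)) (element : String) (exclude : List String) :
    slots.foldl (fun (st : Option String × Option (Nat × String) × Option (Nat × String)) sp =>
      if exclude.contains sp.1 then st
      else
        let first := match st.1 with | none => some sp.1 | some f => some f
        if pvConflict element sp.2 then (first, st.2.1, st.2.2)
        else
          let cand := (sp.2.length, sp.1)
          let relaxed := if pvBetter cand st.2.2 then some cand else st.2.2
          let ideal :=
            if !(pvLargeElements.contains element && sp.2.any (fun e => pvLargeElements.contains e)) then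
              (if pvBetter cand st.2.1 then some cand else st.2.1)
            else st.2.1
          (first, ideal, relaxed)) (none, none, none) =
    ((slots.find? (fun sp => !(exclude.contains sp.1))).map (·.1),
     pvMinL ((slots.filter (pvKeepI element exclude)).map pvCand),
     pvMinL ((slots.filter (pvKeepR element exclude)).map pvCand)) := by
  induction slots using List.reverseRecOn with
  | nil => rfl
  | append_singleton l x ih =>
    rw [List.foldl_append, ih]
    simp only [List.foldl_cons, List.foldl_nil]
    rw [List.find?_append, List.filter_append, List.filter_append]
    by_cases h1 : x.1 ∈ exclude
    · have hki : pvKeepI element exclude x = false := by simp [pvKeepI, pvKeepR, h1]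
      have hkr : pvKeepR element exclude x = false := by simp [pvKeepR, h1]
      simp [h1, hki, hkr, List.find?, Option.orElse]
    · have hx : List.find? (fun sp => !(exclude.contains sp.1)) [x] = some x := by
        simp [List.find?, h1]
      rw [hx]
      by_cases h2 : pvConflict element x.2 = true
      · have hki : pvKeepI element exclude x = false := by simp [pvKeepI, pvKeepR, h2]
        have hkr : pvKeepR element exclude x = false := by simp [pvKeepR, h2]
        cases hf : List.find? (fun sp => !(exclude.contains sp.1)) l <;>
          simp [h1, h2, hki, hkr, hf, Option.orElse]
      · have hkr : pvKeepR element exclude x = true := by simp [pvKeepR, h1, h2]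
        by_cases h3 : (pvLargeElements.contains element && x.2.any (fun e => pvLargeElements.contains e)) = true
        · have hki : pvKeepI element exclude x = false := by
            simp only [pvKeepI, h3, Bool.not_true, Bool.and_false]
          simp at h3
          cases hf : List.find? (fun sp => !(exclude.contains sp.1)) l <;>
            simp [h1, h2, h3, hki, hkr, hf, Option.orElse, pvMinL, pvBetter_eq_min, pvCand]
        · rw [Bool.not_eq_true] at h3
          have hki : pvKeepI element exclude x = true := by
            simp only [pvKeepI, hkr, h3, Bool.not_false, Bool.and_true]
          simp at h3
          cases hf : List.find? (fun sp => !(exclude.contains sp.1)) l <;>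
            (simp [h1, h2, h3, hki, hkr, hf, Option.orElse, pvMinL, pvBetter_eq_min, pvCand]
             try (intro he x1 hx1 hxL; exact absurd hxL (h3 he x1 hx1)))

-- ===== VERDICT (by name: the statement is the Claim_ definition above) =====
theorem find_best_destination_py_spec : Claim_equal_find_best_destination_py := by
  intro slots element exclude _ _
  unfold Spec_find_best_destination_py
  unfold find_best_destination_py find_best_destination_py_alt
  simp only []
  rw [idealA_eq, relaxedA_eq, B_fold_eq]
  cases hI : pvMinL ((slots.filter (pvKeepI element exclude)).map pvCand) with
  | some m =>
    have := sorted2_head ((slots.filter (pvKeepI element exclude)).map pvCand)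
    rw [hI] at this
    cases hs : PySem.List.sorted2 ((slots.filter (pvKeepI element exclude)).map pvCand)
        (fun c => c.1) (fun c => c.2) with
    | nil => rw [hs] at this; simp at this
    | cons c t => rw [hs] at this; simp at this; simp [this]
  | none =>
    have hnil : (slots.filter (pvKeepI element exclude)).map pvCand = [] := by
      have := (pvMinL_eq_none_iff _).mp hI
      exact this
    rw [hnil]
    have hsI : PySem.List.sorted2 ([] : List (Nat × String)) (fun c => c.1) (fun c => c.2) = [] := rfl
    rw [hsI]
    cases hR : pvMinL ((slots.filter (pvKeepR element exclude)).map pvCand) with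
    | some m =>
      have := sorted2_head ((slots.filter (pvKeepR element exclude)).map pvCand)
      rw [hR] at this
      cases hs : PySem.List.sorted2 ((slots.filter (pvKeepR element exclude)).map pvCand)
          (fun c => c.1) (fun c => c.2) with
      | nil => rw [hs] at this; simp at this
      | cons c t => rw [hs] at this; simp at this; simp [this]
    | none =>
      have hnilR : (slots.filter (pvKeepR element exclude)).map pvCand = [] := by
        exact (pvMinL_eq_none_iff _).mp hR
      rw [hnilR, hsI]
      cases hf : slots.find? (fun sp => !(exclude.contains sp.1)) with
      | some sp => simp
      | none => cases slots <;> simp
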